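-- pv_equiv track=rewrite | github.com/MrBrantCode/unitest_baseline | mut_generate/mist_train_taco/taco_12102/solution.py | find_next_magical_number
-- ===== SOURCE A (Python) =====
-- def find_next_magical_number(N: str) -> str:
--     """
--     Finds the next greater magical number that contains only '4' and '7'.
--
--     Parameters:
--     N (str): The input magic number for which we need to find the next magical number.
--
--     Returns:
--     str: The next greater magical number.
--     """
--     def increment_digit(digit):
--         return '7' if digit == '4' else '4'
--
--     digits = list(N)
--     length = len(digits)
--
--     # Start from the least significant digit and move to the most significant
--     for i in range(length - 1, -1, -1):
--         if digits[i] == '4':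
--             digits[i] = '7'
--             return ''.join(digits)
--         else:
--             digits[i] = '4'
--
--     # If all digits were '7', we need to add a new digit '4' at the beginning
--     return '4' + ''.join(digits)
-- ===== SOURCE B (Python) =====
-- def find_next_magical_number(N: str) -> str:
--     # Single forward pass: whenever a '4' is seen, eagerly record the candidate
--     # answer "everything before it + '7'" and reset the trailing counter; other
--     # characters only bump the counter. The last recorded candidate wins.
--     seen = ''      # prefix of N consumed so far
--     best = None    # candidate answer built at the most recent '4'
--     trail = 0      # number of characters consumed since that '4'
--     for c in N:
--         if c == '4':
--             best = seen + '7'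
--             trail = 0
--         else:
--             trail += 1
--         seen += c
--     if best is None:
--         return '4' * (len(N) + 1)
--     return best + '4' * trail
-- ===== Notes on version B (the rewrite author's own statement) =====
-- stated objective: alternative
-- what changed: Replaces A's backward index loop that mutates a char list and carries until it can early-return with a single forward pass over the string that never mutates or indexes: it eagerly builds a candidate answer (prefix plus a seven) each time a four-digit is seen and counts the characters after it, the last candidate plus that many fours being the result.
import Mathlib
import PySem

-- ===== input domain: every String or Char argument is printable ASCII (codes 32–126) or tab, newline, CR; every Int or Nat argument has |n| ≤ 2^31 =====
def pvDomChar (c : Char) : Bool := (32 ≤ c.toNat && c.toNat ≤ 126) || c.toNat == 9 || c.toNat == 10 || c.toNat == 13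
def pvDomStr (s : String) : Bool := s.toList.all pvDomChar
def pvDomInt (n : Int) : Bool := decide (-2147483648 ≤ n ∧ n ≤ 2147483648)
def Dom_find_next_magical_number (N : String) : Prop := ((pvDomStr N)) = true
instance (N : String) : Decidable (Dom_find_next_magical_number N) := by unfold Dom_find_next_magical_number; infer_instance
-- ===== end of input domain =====

-- B replaces A's backward mutating carry loop by a single forward pass that accumulates a
-- candidate answer and a trailing counter (alternative decomposition, no mutation or indexing).

-- ===== PORT A =====
-- the Python for-loop from the last index down: processes the REVERSED digit list front to back;
-- 'some r' = the loop returned early with mutated reversed digits r, 'none' = the loop ran out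
-- (every digit was set to '4' along the way).
def pvLoopA : List Char → Option (List Char)
  | [] => none
  | c :: t => if c = '4' then some ('7' :: t) else (pvLoopA t).map (fun r => '4' :: r)

def find_next_magical_number (N : String) : String :=
  match pvLoopA N.toList.reverse with
  | some r => String.mk r.reverse
  | none => String.mk ('4' :: N.toList.map (fun _ => '4'))  -- '4' + ''.join(digits), all digits mutated to '4'

-- ===== PORT B =====
-- one step of Source B's forward loop on the state (seen, best, trail)
def pvStepB (st : List Char × Option (List Char) × Nat) (c : Char) :
    List Char × Option (List Char) × Nat :=
  if c = '4' then (st.1 ++ [c], some (st.1 ++ ['7']), 0)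
  else (st.1 ++ [c], st.2.1, st.2.2 + 1)

-- the return statements after the loop: 'best + trail fours' or all fours one longer
def pvFinishB (L : Nat) (st : List Char × Option (List Char) × Nat) : String :=
  match st.2.1 with
  | none => String.mk (List.replicate (L + 1) '4')        -- '4' * (len(N) + 1)
  | some b => String.mk (b ++ List.replicate st.2.2 '4')  -- best + '4' * trail

def find_next_magical_number_alt (N : String) : String :=
  pvFinishB N.toList.length (N.toList.foldl pvStepB ([], none, 0))

-- ===== PRECONDITION & SPEC =====
def Spec_find_next_magical_number (N : String) (out : String) : Prop := out = find_next_magical_number_alt N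
instance (N : String) (out : String) : Decidable (Spec_find_next_magical_number N out) := by unfold Spec_find_next_magical_number; infer_instance

-- ===== CLAIM (what is proved, stated in full; the proofs are below) =====
def Claim_equal_find_next_magical_number : Prop := ∀ (N : String), Dom_find_next_magical_number N → Spec_find_next_magical_number N (find_next_magical_number N)

-- ===== LEMMAS AND PROOFS =====

-- proof-only notion: position of the rightmost '4' (none if absent); both ports are related to it
def pvRfind4 : List Char → Option Nat
  | [] => none
  | c :: t =>
    match pvRfind4 t with
    | some j => some (j + 1)
    | none => if c = '4' then some 0 else none

theorem pvRfind4_none_iff (l : List Char) : pvRfind4 l = none ↔ ∀ c ∈ l, c ≠ '4' := by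
  induction l with
  | nil => simp [pvRfind4]
  | cons c t ih =>
    simp only [pvRfind4]
    cases h : pvRfind4 t with
    | some j =>
      constructor
      · intro habs; simp at habs
      · intro hall
        have hn : pvRfind4 t = none := ih.mpr (fun d hd => hall d (List.mem_cons_of_mem _ hd))
        exact absurd (hn.symm.trans h) (by simp)
    | none =>
      by_cases hc : c = '4'
      · simp [hc]
      · rw [if_neg hc]
        constructor
        · intro _ d hd
          rcases List.mem_cons.mp hd with rfl | hd'
          · exact hc
          · exact ih.mp h d hd'
        · intro _; rfl

theorem pvLoopA_none_iff (l : List Char) : pvLoopA l = none ↔ ∀ c ∈ l, c ≠ '4' := by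
  induction l with
  | nil => simp [pvLoopA]
  | cons c t ih =>
    by_cases hc : c = '4'
    · simp [pvLoopA, hc]
    · simp only [pvLoopA, if_neg hc]
      cases h : pvLoopA t with
      | some r =>
        constructor
        · intro habs; simp at habs
        · intro hall
          have hn : pvLoopA t = none := ih.mpr (fun d hd => hall d (List.mem_cons_of_mem _ hd))
          exact absurd (hn.symm.trans h) (by simp)
      | none =>
        constructor
        · intro _ d hd
          rcases List.mem_cons.mp hd with rfl | hd'
          · exact hc
          · exact ih.mp h d hd'
        · intro _; rfl

theorem pvRfind4_lt (l : List Char) (i : Nat) (h : pvRfind4 l = some i) : i < l.length := by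
  induction l generalizing i with
  | nil => simp [pvRfind4] at h
  | cons c t ih =>
    simp only [pvRfind4] at h
    cases ht : pvRfind4 t with
    | some j =>
      rw [ht] at h
      injection h with h
      have := ih j ht
      simp only [List.length_cons]
      omega
    | none =>
      rw [ht] at h
      by_cases hc : c = '4'
      · rw [if_pos hc] at h
        injection h with h
        subst h
        simp
      · rw [if_neg hc] at h; cases h

theorem pvRfind4_append_singleton (xs : List Char) (c : Char) :
    pvRfind4 (xs ++ [c]) = if c = '4' then some xs.length else pvRfind4 xs := by
  induction xs with
  | nil => by_cases hc : c = '4' <;> simp [pvRfind4, hc]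
  | cons x t ih =>
    simp only [List.cons_append, pvRfind4, ih]
    by_cases hc : c = '4'
    · simp [hc]
    · simp [hc]

-- A's loop result, characterised by the rightmost-'4' position
theorem pv_resA_closed (l : List Char) :
    (match pvLoopA l.reverse with
     | some r => r.reverse
     | none => '4' :: l.map (fun _ => '4')) =
    (match pvRfind4 l with
     | none => List.replicate (l.length + 1) '4'
     | some i => l.take i ++ '7' :: List.replicate (l.length - 1 - i) '4') := by
  induction l using List.reverseRecOn with
  | nil => simp [pvLoopA, pvRfind4, List.replicate]
  | append_singleton xs c ih =>
    rw [pvRfind4_append_singleton]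
    by_cases hc : c = '4'
    · subst hc
      simp [pvLoopA, List.reverse_append]
    · rw [if_neg hc]
      have hrev : (xs ++ [c]).reverse = c :: xs.reverse := by simp
      rw [hrev]
      simp only [pvLoopA, if_neg hc]
      cases h : pvLoopA xs.reverse with
      | none =>
        have hx : pvRfind4 xs = none := by
          rw [pvRfind4_none_iff]
          intro d hd
          exact (pvLoopA_none_iff xs.reverse).mp h d (by simpa using hd)
        rw [hx]
        simp only [Option.map_none]
        simp [List.map_const', List.replicate_succ]
        rw [← List.replicate_succ', List.replicate_succ]
      | some r =>
        have hx : pvRfind4 xs ≠ none := by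
          rw [Ne, pvRfind4_none_iff]
          intro hall
          have hn : pvLoopA xs.reverse = none := by
            rw [pvLoopA_none_iff]; intro d hd; exact hall d (by simpa using hd)
          exact absurd (hn.symm.trans h) (by simp)
        cases hi : pvRfind4 xs with
        | none => exact absurd hi hx
        | some i =>
          have hlt : i < xs.length := pvRfind4_lt xs i hi
          have ih' := ih
          rw [h, hi] at ih'
          have htake : (xs ++ [c]).take i = xs.take i := by
            rw [List.take_append_of_le_length (by omega)]
          have hlen : (xs ++ [c]).length - 1 - i = (xs.length - 1 - i) + 1 := by
            simp only [List.length_append, List.length_cons, List.length_nil]; omega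
          simp only [Option.map_some]
          rw [htake, hlen]
          simp only [List.reverse_cons]
          have ih2 : r.reverse = List.take i xs ++ '7' :: List.replicate (xs.length - 1 - i) '4' := ih'
          rw [ih2]
          rw [show List.replicate ((xs.length - 1 - i) + 1) '4' =
                List.replicate (xs.length - 1 - i) '4' ++ ['4'] from List.replicate_succ']
          simp

-- B's forward fold, characterised by the same rightmost-'4' position
theorem pv_foldB_closed (l : List Char) :
    l.foldl pvStepB ([], none, 0) =
      (l,
       match pvRfind4 l with
       | none => none
       | some i => some (l.take i ++ ['7']),
       match pvRfind4 l with
       | none => l.length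
       | some i => l.length - 1 - i) := by
  induction l using List.reverseRecOn with
  | nil => simp [pvRfind4]
  | append_singleton xs c ih =>
    rw [List.foldl_append, ih, pvRfind4_append_singleton]
    by_cases hc : c = '4'
    · subst hc
      simp only [List.foldl_cons, List.foldl_nil, pvStepB, if_pos rfl]
      simp
    · simp only [List.foldl_cons, List.foldl_nil, pvStepB, if_neg hc, if_neg hc]
      cases hi : pvRfind4 xs with
      | none =>
        refine Prod.ext rfl (Prod.ext rfl ?_)
        show xs.length + 1 = (xs ++ [c]).length
        simp
      | some i =>
        have hlt : i < xs.length := pvRfind4_lt xs i hi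
        have htake : (xs ++ [c]).take i = xs.take i := by
          rw [List.take_append_of_le_length (by omega)]
        refine Prod.ext rfl (Prod.ext ?_ ?_)
        · show some (xs.take i ++ ['7']) = some ((xs ++ [c]).take i ++ ['7'])
          rw [htake]
        · show (xs.length - 1 - i) + 1 = (xs ++ [c]).length - 1 - i
          simp only [List.length_append, List.length_cons, List.length_nil]
          omega

-- ===== VERDICT (by name: the statement is the Claim_ definition above) =====
theorem find_next_magical_number_spec : Claim_equal_find_next_magical_number := by
  intro N _
  unfold Spec_find_next_magical_number find_next_magical_number find_next_magical_number_alt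
  have hA := pv_resA_closed N.toList
  have hB := pv_foldB_closed N.toList
  rw [hB]
  unfold pvFinishB
  cases hi : pvRfind4 N.toList with
  | none =>
    rw [hi] at hA
    cases hL : pvLoopA N.toList.reverse with
    | some r =>
      rw [hL] at hA
      have : r.reverse = List.replicate (N.toList.length + 1) '4' := hA
      exact congrArg String.mk this
    | none =>
      rw [hL] at hA
      have : '4' :: N.toList.map (fun _ => '4') = List.replicate (N.toList.length + 1) '4' := hA
      exact congrArg String.mk this
  | some i =>
    rw [hi] at hA
    have happ : (N.toList.take i ++ ['7']) ++ List.replicate (N.toList.length - 1 - i) '4'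
        = N.toList.take i ++ '7' :: List.replicate (N.toList.length - 1 - i) '4' := by simp
    cases hL : pvLoopA N.toList.reverse with
    | some r =>
      rw [hL] at hA
      have : r.reverse = N.toList.take i ++ '7' :: List.replicate (N.toList.length - 1 - i) '4' := hA
      exact congrArg String.mk (by rw [this, happ])
    | none =>
      rw [hL] at hA
      have : '4' :: N.toList.map (fun _ => '4')
          = N.toList.take i ++ '7' :: List.replicate (N.toList.length - 1 - i) '4' := hA
      exact congrArg String.mk (by rw [this, happ])
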